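-- pv_equiv track=rewrite | github.com/pypi-data/pypi-mirror-397 | packages/specify-extend/specify_extend-1.3.3-py3-none-any.whl/specify_extend.py | format_template_with_sections
-- ===== SOURCE A (Python) =====
-- from typing import Optional, List, Tuple
--
-- HEADER_PREFIX_LENGTH = 3  # Length of '## ' prefix
--
-- def int_to_roman(num: int) -> str:
--     """Convert integer to Roman numeral
--
--     Args:
--         num: Positive integer to convert
--
--     Returns:
--         Roman numeral representation
--
--     Raises:
--         ValueError: If num is less than or equal to 0
--     """
--     if num <= 0:
--         raise ValueError(f"Cannot convert {num} to Roman numeral (must be positive)")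
--
--     val = [
--         1000, 900, 500, 400,
--         100, 90, 50, 40,
--         10, 9, 5, 4,
--         1
--     ]
--     syms = [
--         "M", "CM", "D", "CD",
--         "C", "XC", "L", "XL",
--         "X", "IX", "V", "IV",
--         "I"
--     ]
--
--     roman_num = ''
--     i = 0
--     while num > 0:
--         for _ in range(num // val[i]):
--             roman_num += syms[i]
--             num -= val[i]
--         i += 1
--
--     return roman_num
--
-- def format_template_with_sections(template_content: str, numbering_style: Optional[str], start_number: int) -> str:
--     """
--     Format the template content with proper section numbering.
--
--     Args:
--         template_content: The raw template content
--         numbering_style: 'roman', 'numeric', or None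
--         start_number: The starting number for the first section
--
--     Returns:
--         Formatted template with section numbers
--     """
--     if not numbering_style:
--         # No existing numbering, just return as-is
--         return template_content
--
--     lines = template_content.split('\n')
--     result = []
--     current_section = start_number
--
--     for line in lines:
--         # Check if this is exactly a ## header (not ### or ####)
--         stripped = line.strip()
--         # Must start with '## ' and the character after '## ' must not be '#'
--         if stripped.startswith('## ') and len(stripped) > HEADER_PREFIX_LENGTH and stripped[HEADER_PREFIX_LENGTH] != '#':
--             # Extract the section title (remove '## ')
--             title = stripped[HEADER_PREFIX_LENGTH:]
--
--             # Format the section number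
--             if numbering_style == 'roman':
--                 section_num = int_to_roman(current_section)
--             else:  # numeric
--                 section_num = str(current_section)
--
--             # Create the new line with section number
--             result.append(f"### {section_num}. {title}")
--             current_section += 1
--         else:
--             result.append(line)
--
--     return '\n'.join(result)
-- ===== SOURCE B (Python) =====
-- HUNDREDS = ["", "C", "CC", "CCC", "CD", "D", "DC", "DCC", "DCCC", "CM"]
-- TENS = ["", "X", "XX", "XXX", "XL", "L", "LX", "LXX", "LXXX", "XC"]
-- UNITS = ["", "I", "II", "III", "IV", "V", "VI", "VII", "VIII", "IX"]
--
--
-- def int_to_roman(num: int) -> str: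
--     """Roman numeral by decimal place value: num//1000 'M's, then fixed
--     per-digit lookup tables for the hundreds, tens and units digits."""
--     return ("M" * (num // 1000)
--             + HUNDREDS[num // 100 % 10]
--             + TENS[num // 10 % 10]
--             + UNITS[num % 10])
--
--
-- def format_template_with_sections(template_content, numbering_style, start_number):
--     if not numbering_style:
--         return template_content
--     out = []
--     n = start_number
--     for line in template_content.split('\n'):
--         stripped = line.strip()
--         if stripped.startswith('## '):
--             title = stripped[3:]
--             if title and not title.startswith('#'):
--                 num = int_to_roman(n) if numbering_style == 'roman' else str(n)
--                 out.append(f"### {num}. {title}")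
--                 n += 1
--                 continue
--         out.append(line)
--     return '\n'.join(out)
-- ===== Notes on version B (the rewrite author's own statement) =====
-- stated objective: alternative
-- what changed: int_to_roman is reimplemented by decimal place value (num//1000 'M's plus fixed per-digit lookup tables for hundreds/tens/units) instead of the greedy subtraction loop over a 13-entry value table, and the line loop is restructured around an extracted title with continue instead of one compound condition.
import Mathlib
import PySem

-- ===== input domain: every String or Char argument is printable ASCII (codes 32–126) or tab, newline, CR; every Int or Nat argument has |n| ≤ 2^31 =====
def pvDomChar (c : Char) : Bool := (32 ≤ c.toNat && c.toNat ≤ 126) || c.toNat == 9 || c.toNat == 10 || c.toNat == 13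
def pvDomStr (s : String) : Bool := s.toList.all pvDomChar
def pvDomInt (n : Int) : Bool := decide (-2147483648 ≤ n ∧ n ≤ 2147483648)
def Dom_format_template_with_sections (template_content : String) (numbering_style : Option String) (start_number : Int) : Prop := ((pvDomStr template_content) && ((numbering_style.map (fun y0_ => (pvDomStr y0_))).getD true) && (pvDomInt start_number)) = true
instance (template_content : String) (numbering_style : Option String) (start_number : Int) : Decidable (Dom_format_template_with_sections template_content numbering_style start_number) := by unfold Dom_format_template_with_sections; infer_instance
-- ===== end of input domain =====

-- B: roman numerals by per-digit place-value tables instead of greedy subtraction; line loop restructured (alternative decomposition, same cost).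


-- ===== PORT A =====
-- A-side helpers: greedy subtraction over the 13-entry value/symbol table
def pvSymsA : List (Int × List Char) :=
  [(1000, ['M']), (900, ['C','M']), (500, ['D']), (400, ['C','D']),
   (100, ['C']), (90, ['X','C']), (50, ['L']), (40, ['X','L']),
   (10, ['X']), (9, ['I','X']), (5, ['V']), (4, ['I','V']), (1, ['I'])]

-- "while num > 0: for _ in range(num // val[i]): roman_num += syms[i]; num -= val[i]; i += 1"
def pvRomanGoA : List (Int × List Char) → Int → List Char
  | [], _ => []
  | (v, s) :: rest, num =>
    if num ≤ 0 then []  -- while-condition fails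
    else
      let k := (PySem.Int.floordiv num v).toNat  -- range(num // val[i]) iterates this many times (num//v ≥ 0 here)
      (List.replicate k s).flatten ++ pvRomanGoA rest (num - (k : Int) * v)

def pvIntToRomanA (num : Int) : List Char :=
  -- Python raises ValueError for num ≤ 0; Pre_ excludes every call with num ≤ 0 ([] is a junk value)
  if num ≤ 0 then [] else pvRomanGoA pvSymsA num

def pvLoopA (sty : List Char) : List (List Char) → Int → List (List Char)
  | [], _ => []
  | line :: rest, n =>
    let s := PySem.Chars.strip line
    if PySem.Chars.startswith s ['#', '#', ' '] && decide (3 < s.length)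
        && !(PySem.List.pyGet? s 3 == some '#') then
      let title := PySem.List.slice s (some 3) none
      let num := if sty == ['r', 'o', 'm', 'a', 'n'] then pvIntToRomanA n else PySem.Int.toChars n
      (['#', '#', '#', ' '] ++ num ++ ['.', ' '] ++ title) :: pvLoopA sty rest (n + 1)
    else
      line :: pvLoopA sty rest n

def format_template_with_sections (template_content : String) (numbering_style : Option String) (start_number : Int) : String :=
  match numbering_style with
  | none => template_content                       -- "if not numbering_style"
  | some sty =>
    if sty = "" then template_content
    else
      String.ofList (PySem.Chars.join ['\n']
        (pvLoopA sty.toList (PySem.Chars.splitOn template_content.toList ['\n']) start_number))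

-- ===== PORT B =====
-- B-side helpers: roman numeral by decimal place value with per-digit tables
def pvHund : List (List Char) :=
  [[], ['C'], ['C','C'], ['C','C','C'], ['C','D'], ['D'], ['D','C'], ['D','C','C'], ['D','C','C','C'], ['C','M']]
def pvTens : List (List Char) :=
  [[], ['X'], ['X','X'], ['X','X','X'], ['X','L'], ['L'], ['L','X'], ['L','X','X'], ['L','X','X','X'], ['X','C']]
def pvUnits : List (List Char) :=
  [[], ['I'], ['I','I'], ['I','I','I'], ['I','V'], ['V'], ['V','I'], ['V','I','I'], ['V','I','I','I'], ['I','X']]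

def pvIntToRomanB (num : Int) : List Char :=
  (List.replicate (PySem.Int.floordiv num 1000).toNat ['M']).flatten   -- "M" * (num // 1000)
  ++ pvHund.getD (PySem.Int.mod (PySem.Int.floordiv num 100) 10).toNat []   -- index is in 0..9: getD exact
  ++ pvTens.getD (PySem.Int.mod (PySem.Int.floordiv num 10) 10).toNat []
  ++ pvUnits.getD (PySem.Int.mod num 10).toNat []

def pvLoopB (sty : List Char) : List (List Char) → Int → List (List Char)
  | [], _ => []
  | line :: rest, n =>
    let stripped := PySem.Chars.strip line
    if PySem.Chars.startswith stripped ['#', '#', ' '] then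
      let title := PySem.List.slice stripped (some 3) none
      if !title.isEmpty && !(PySem.Chars.startswith title ['#']) then
        let num := if sty == ['r', 'o', 'm', 'a', 'n'] then pvIntToRomanB n else PySem.Int.toChars n
        (['#', '#', '#', ' '] ++ num ++ ['.', ' '] ++ title) :: pvLoopB sty rest (n + 1)
      else line :: pvLoopB sty rest n
    else line :: pvLoopB sty rest n

def format_template_with_sections_alt (template_content : String) (numbering_style : Option String) (start_number : Int) : String :=
  match numbering_style with
  | none => template_content
  | some sty =>
    if sty = "" then template_content
    else
      String.ofList (PySem.Chars.join ['\n']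
        (pvLoopB sty.toList (PySem.Chars.splitOn template_content.toList ['\n']) start_number))

-- ===== PRECONDITION & SPEC =====
-- a '## ' header line exactly as the Python condition tests it
def pvIsHeader (line : List Char) : Bool :=
  let s := PySem.Chars.strip line
  PySem.Chars.startswith s ['#', '#', ' '] && decide (3 < s.length) && !(PySem.List.pyGet? s 3 == some '#')

-- Pre_ excludes exactly the inputs on which A raises ValueError: style 'roman', start_number ≤ 0,
-- and at least one '## ' header line (int_to_roman is then called with a non-positive argument).
def Pre_format_template_with_sections (template_content : String) (numbering_style : Option String) (start_number : Int) : Prop :=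
  numbering_style = some "roman" →
    1 ≤ start_number ∨ ∀ l ∈ PySem.Chars.splitOn template_content.toList ['\n'], pvIsHeader l = false

instance (template_content : String) (numbering_style : Option String) (start_number : Int) : Decidable (Pre_format_template_with_sections template_content numbering_style start_number) := by unfold Pre_format_template_with_sections; infer_instance

def pvWitness_format_template_with_sections : String × Option String × Int := ("## Intro\nbody\n## Next steps", some "roman", 2)

def Spec_format_template_with_sections (template_content : String) (numbering_style : Option String) (start_number : Int) (out : String) : Prop := out = format_template_with_sections_alt template_content numbering_style start_number
instance (template_content : String) (numbering_style : Option String) (start_number : Int) (out : String) : Decidable (Spec_format_template_with_sections template_content numbering_style start_number out) := by unfold Spec_format_template_with_sections; infer_instance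

-- ===== CLAIM (what is proved, stated in full; the proofs are below) =====
def Claim_equal_format_template_with_sections : Prop := ∀ (template_content : String) (numbering_style : Option String) (start_number : Int), Dom_format_template_with_sections template_content numbering_style start_number → Pre_format_template_with_sections template_content numbering_style start_number → Spec_format_template_with_sections template_content numbering_style start_number (format_template_with_sections template_content numbering_style start_number)

-- ===== LEMMAS AND PROOFS =====
theorem pvWitness_ok : Dom_format_template_with_sections (pvWitness_format_template_with_sections.1) (pvWitness_format_template_with_sections.2.1) (pvWitness_format_template_with_sections.2.2) ∧ Pre_format_template_with_sections (pvWitness_format_template_with_sections.1) (pvWitness_format_template_with_sections.2.1) (pvWitness_format_template_with_sections.2.2) := by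
  constructor <;> decide

def pvRestA : List (Int × List Char) :=
  [(900, ['C','M']), (500, ['D']), (400, ['C','D']),
   (100, ['C']), (90, ['X','C']), (50, ['L']), (40, ['X','L']),
   (10, ['X']), (9, ['I','X']), (5, ['V']), (4, ['I','V']), (1, ['I'])]

theorem pvSymsA_cons : pvSymsA = (1000, ['M']) :: pvRestA := rfl

set_option maxRecDepth 100000 in
-- the 12 remaining greedy steps on a value < 1000 are exactly the three digit tables
theorem pvRest_eq : ∀ m : Nat, m < 1000 →
    pvRomanGoA pvRestA (m : Int) =
      pvHund.getD (PySem.Int.mod (PySem.Int.floordiv (m : Int) 100) 10).toNat []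
      ++ pvTens.getD (PySem.Int.mod (PySem.Int.floordiv (m : Int) 10) 10).toNat []
      ++ pvUnits.getD (PySem.Int.mod (m : Int) 10).toNat [] := by
  decide

theorem roman_eq (n : Int) (h : 1 ≤ n) : pvIntToRomanA n = pvIntToRomanB n := by
  have h1000 : PySem.Int.floordiv n 1000 = n / 1000 := PySem.Int.floordiv_eq_ediv_of_pos (by omega)
  have hq : ((n / 1000).toNat : Int) = n / 1000 := Int.toNat_of_nonneg (by positivity)
  set m : Nat := (n % 1000).toNat with hm
  have hmi : (m : Int) = n % 1000 := Int.toNat_of_nonneg (by omega)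
  have hmlt : m < 1000 := by omega
  have hr : n - ((PySem.Int.floordiv n 1000).toNat : Int) * 1000 = (m : Int) := by
    rw [h1000, hq]; omega
  have h100 : PySem.Int.mod (PySem.Int.floordiv (m : Int) 100) 10 = PySem.Int.mod (PySem.Int.floordiv n 100) 10 := by
    rw [PySem.Int.floordiv_eq_ediv_of_pos (by omega : (0:Int) < 100),
        PySem.Int.floordiv_eq_ediv_of_pos (by omega : (0:Int) < 100),
        PySem.Int.mod_eq_emod_of_pos (by omega : (0:Int) < 10),
        PySem.Int.mod_eq_emod_of_pos (by omega : (0:Int) < 10), hmi]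
    omega
  have h10 : PySem.Int.mod (PySem.Int.floordiv (m : Int) 10) 10 = PySem.Int.mod (PySem.Int.floordiv n 10) 10 := by
    rw [PySem.Int.floordiv_eq_ediv_of_pos (by omega : (0:Int) < 10),
        PySem.Int.floordiv_eq_ediv_of_pos (by omega : (0:Int) < 10),
        PySem.Int.mod_eq_emod_of_pos (by omega : (0:Int) < 10),
        PySem.Int.mod_eq_emod_of_pos (by omega : (0:Int) < 10), hmi]
    omega
  have h1 : PySem.Int.mod (m : Int) 10 = PySem.Int.mod n 10 := by
    rw [PySem.Int.mod_eq_emod_of_pos (by omega : (0:Int) < 10),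
        PySem.Int.mod_eq_emod_of_pos (by omega : (0:Int) < 10), hmi]
    omega
  unfold pvIntToRomanA pvIntToRomanB
  rw [if_neg (by omega), pvSymsA_cons]
  unfold pvRomanGoA
  rw [if_neg (by omega)]
  simp only [hr, pvRest_eq m hmlt, h100, h10, h1, List.append_assoc]

-- the two ports test the same header condition
theorem cond_eq (s : List Char) :
    (PySem.Chars.startswith s ['#', '#', ' '] && decide (3 < s.length)
        && !(PySem.List.pyGet? s 3 == some '#'))
    = (PySem.Chars.startswith s ['#', '#', ' ']
        && (!(PySem.List.slice s (some 3) none).isEmpty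
            && !(PySem.Chars.startswith (PySem.List.slice s (some 3) none) ['#']))) := by
  rcases s with _ | ⟨a, _ | ⟨b, _ | ⟨c, _ | ⟨d, t⟩⟩⟩⟩ <;>
    simp [PySem.Chars.startswith, PySem.List.slice, PySem.List.pyGet?, PySem.List.pyIdx?]
  rw [if_pos (by omega)]
  simp [List.isPrefixOf, BEq.comm]

theorem loop_eq (sty : List Char) (lines : List (List Char)) (n : Int)
    (h : sty = ['r', 'o', 'm', 'a', 'n'] → 1 ≤ n ∨ ∀ l ∈ lines, pvIsHeader l = false) :
    pvLoopA sty lines n = pvLoopB sty lines n := by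
  induction lines generalizing n with
  | nil => rfl
  | cons line rest ih =>
    have htail : sty = ['r', 'o', 'm', 'a', 'n'] → 1 ≤ n ∨ ∀ l ∈ rest, pvIsHeader l = false :=
      fun hr => (h hr).imp id (fun hall l hl => hall l (List.mem_cons_of_mem _ hl))
    simp only [pvLoopA, pvLoopB]
    by_cases hp : PySem.Chars.startswith (PySem.Chars.strip line) ['#', '#', ' '] = true
    · by_cases hq : (!(PySem.List.slice (PySem.Chars.strip line) (some 3) none).isEmpty
            && !(PySem.Chars.startswith (PySem.List.slice (PySem.Chars.strip line) (some 3) none) ['#'])) = true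
      · have hc : (PySem.Chars.startswith (PySem.Chars.strip line) ['#', '#', ' ']
            && decide (3 < (PySem.Chars.strip line).length)
            && !(PySem.List.pyGet? (PySem.Chars.strip line) 3 == some '#')) = true := by
          rw [cond_eq, hp, hq]; rfl
        have hhd : pvIsHeader line = true := hc
        have hge : sty = ['r', 'o', 'm', 'a', 'n'] → 1 ≤ n := by
          intro hr
          rcases h hr with h1 | h2
          · exact h1
          · exact absurd (h2 line (List.mem_cons_self)) (by simp [hhd])
        rw [if_pos hc, if_pos hp, if_pos hq,
            ih (n + 1) (fun hr => Or.inl (by have := hge hr; omega))]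
        by_cases hR : sty = ['r', 'o', 'm', 'a', 'n']
        · simp [hR, roman_eq n (hge hR)]
        · simp [hR]
      · have hc : (PySem.Chars.startswith (PySem.Chars.strip line) ['#', '#', ' ']
            && decide (3 < (PySem.Chars.strip line).length)
            && !(PySem.List.pyGet? (PySem.Chars.strip line) 3 == some '#')) = false := by
          rw [cond_eq, hp]; simpa using hq
        rw [if_neg (by simp [hc]), if_pos hp, if_neg (by simp [hq]), ih n htail]
    · have hc : (PySem.Chars.startswith (PySem.Chars.strip line) ['#', '#', ' ']
          && decide (3 < (PySem.Chars.strip line).length)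
          && !(PySem.List.pyGet? (PySem.Chars.strip line) 3 == some '#')) = false := by
        simp [Bool.eq_false_iff.mp (Bool.not_eq_true _ ▸ hp)]
      rw [if_neg (by simp [hc]), if_neg (by simp [hp]), ih n htail]

-- ===== VERDICT (by name: the statement is the Claim_ definition above) =====
theorem format_template_with_sections_spec : Claim_equal_format_template_with_sections := by
  intro tc style start _hdom hpre
  unfold Spec_format_template_with_sections format_template_with_sections format_template_with_sections_alt
  rcases style with _ | sty
  · rfl
  · by_cases hs : sty = ""
    · simp [hs]
    · simp only [if_neg hs]
      congr 2
      apply loop_eq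
      intro hroman
      have hsty : sty = "roman" := by
        have := congrArg String.ofList hroman
        simpa using this
      exact hpre (by rw [hsty])
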